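-- pv_equiv track=rewrite | github.com/Ksenox/ANN-2021 | 8383/Maximova/lb/6/code.py | wordProcessing
-- ===== SOURCE A (Python) =====
-- import string
--
-- def wordProcessing(text):
--     text = text.lower()
--     text = text.strip()
--     for strp in string.punctuation:
--         if strp in text:
--             text = text.replace(strp, "")
--     text = text.split(" ")
--
--     # text = text.split()
--     return text
-- ===== SOURCE B (Python) =====
-- import string
--
-- _PUNCT = set(string.punctuation)
--
-- def wordProcessing(text):
--     cleaned = "".join(ch for ch in text.lower().strip() if ch not in _PUNCT)
--     return cleaned.split(" ")
-- ===== Notes on version B (the rewrite author's own statement) =====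
-- stated objective: simpler
-- what changed: B makes one pass over the lowered, stripped text, keeping each character not in a precomputed punctuation set, instead of A's 32 successive membership-test-plus-replace passes (one per punctuation character) over the whole text.
import Mathlib
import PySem

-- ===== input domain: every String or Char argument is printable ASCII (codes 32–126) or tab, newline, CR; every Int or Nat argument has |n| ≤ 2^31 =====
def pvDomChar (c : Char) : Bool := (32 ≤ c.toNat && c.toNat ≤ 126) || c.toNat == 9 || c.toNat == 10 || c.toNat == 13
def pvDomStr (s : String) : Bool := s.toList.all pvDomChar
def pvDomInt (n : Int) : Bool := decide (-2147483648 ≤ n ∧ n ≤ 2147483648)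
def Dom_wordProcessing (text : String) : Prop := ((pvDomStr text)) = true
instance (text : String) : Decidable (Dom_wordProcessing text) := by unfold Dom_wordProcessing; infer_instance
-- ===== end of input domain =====

-- B replaces A's 32 successive "if punct-char in text: replace it" passes by one pass over the
-- text's characters filtered against a punctuation set; return values are proved equal everywhere.

-- string.punctuation, as a list of its 32 characters
def pvPunct : List Char := "!\"#$%&'()*+,-./:;<=>?@[\\]^_`{|}~".toList

-- ===== PORT A =====
def wordProcessing (text : String) : List String :=
  let text1 := PySem.Str.lower text
  let text2 := PySem.Str.strip text1
  let text3 := pvPunct.foldl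
    (fun t strp =>
      if PySem.Str.isIn (String.ofList [strp]) t
      then PySem.Str.replace t (String.ofList [strp]) ""
      else t) text2
  -- text.split(" "): non-empty separator, exact via Chars.splitOn
  (PySem.Chars.splitOn text3.toList [' ']).map String.ofList

-- ===== PORT B =====
def wordProcessing_alt (text : String) : List String :=
  let punct : PySem.Set Char := PySem.Set.ofList pvPunct
  let cleaned := (PySem.Str.strip (PySem.Str.lower text)).toList.filter
    (fun ch => !(PySem.Set.contains punct ch))
  (PySem.Chars.splitOn cleaned [' ']).map String.ofList

-- ===== PRECONDITION & SPEC =====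
def Spec_wordProcessing (text : String) (out : List String) : Prop := out = wordProcessing_alt text
instance (text : String) (out : List String) : Decidable (Spec_wordProcessing text out) := by unfold Spec_wordProcessing; infer_instance

-- ===== CLAIM (what is proved, stated in full; the proofs are below) =====
def Claim_equal_wordProcessing : Prop := ∀ (text : String), Dom_wordProcessing text → Spec_wordProcessing text (wordProcessing text)

-- ===== LEMMAS AND PROOFS =====

-- replace.go with a one-char pattern and empty replacement is a filter
theorem pv_go_filter (c : Char) : ∀ (fuel : Nat) (l acc : List Char), l.length ≤ fuel →
    PySem.Chars.replace.go [c] [] fuel l acc = acc.reverse ++ l.filter (fun x => x != c) := by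
  intro fuel
  induction fuel with
  | zero =>
    intro l acc h
    have : l = [] := List.length_eq_zero_iff.mp (Nat.le_zero.mp h)
    subst this
    simp [PySem.Chars.replace.go]
  | succ n ih =>
    intro l acc h
    cases l with
    | nil => simp [PySem.Chars.replace.go]
    | cons x t =>
      simp only [PySem.Chars.replace.go]
      by_cases hx : c = x
      · subst hx
        simp only [List.isPrefixOf, BEq.rfl, Bool.true_and, if_pos,
          List.length_cons, List.length_nil, List.drop_succ_cons, List.drop_zero,
          List.reverse_nil, List.nil_append]
        rw [ih t acc (by simpa using Nat.le_of_succ_le_succ h)]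
        simp
      · have : List.isPrefixOf [c] (x :: t) = false := by
          simp [List.isPrefixOf, hx]
        rw [this]
        simp only [Bool.false_eq_true, if_false]
        rw [ih t (x :: acc) (by simpa using Nat.le_of_succ_le_succ h)]
        simp [bne, Ne.symm hx]

theorem pv_replace_filter (c : Char) (s : List Char) :
    PySem.Chars.replace s [c] [] = s.filter (fun x => x != c) := by
  rw [PySem.Chars.replace]
  simp only [List.isEmpty]
  exact pv_go_filter c s.length s [] le_rfl

-- one step of A's loop deletes exactly the occurrences of that character
theorem pv_step_filter (p : Char) (s : String) :
    (if PySem.Str.isIn (String.ofList [p]) s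
     then PySem.Str.replace s (String.ofList [p]) ""
     else s).toList = s.toList.filter (fun x => x != p) := by
  by_cases hin : PySem.Str.isIn (String.ofList [p]) s = true
  · rw [if_pos hin, PySem.Str.toList_replace]
    simpa using pv_replace_filter p s.toList
  · rw [if_neg hin]
    have hne : p ∉ s.toList := by
      intro hmem
      apply hin
      rw [PySem.Str.isIn_eq]
      rw [PySem.Chars.isIn_iff_infix]
      obtain ⟨l1, l2, heq⟩ := List.append_of_mem hmem
      rw [heq]
      exact ⟨l1, l2, by simp⟩
    symm
    apply List.filter_eq_self.mpr
    intro a ha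
    simp only [bne_iff_ne, ne_eq]
    intro hap
    exact hne (hap ▸ ha)

-- A's whole loop is a single filter against the punctuation list
theorem pv_fold_filter (ps : List Char) : ∀ (s : String),
    (ps.foldl (fun t strp =>
        if PySem.Str.isIn (String.ofList [strp]) t
        then PySem.Str.replace t (String.ofList [strp]) ""
        else t) s).toList
      = s.toList.filter (fun ch => !(ps.contains ch)) := by
  induction ps with
  | nil => intro s; simp
  | cons p ps ih =>
    intro s
    rw [List.foldl_cons, ih]
    rw [pv_step_filter p s]
    rw [List.filter_filter]
    apply List.filter_congr
    intro x _
    by_cases hxp : x = p <;> by_cases hxps : x ∈ ps <;> simp [hxp, hxps]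

theorem pv_set_contains (ch : Char) :
    PySem.Set.contains (PySem.Set.ofList pvPunct) ch = pvPunct.contains ch := by
  simp only [PySem.Set.contains]
  rw [Bool.eq_iff_iff, List.contains_iff_mem, List.contains_iff_mem]
  exact PySem.Set.mem_ofList pvPunct ch

-- ===== VERDICT (by name: the statement is the Claim_ definition above) =====
theorem wordProcessing_spec : Claim_equal_wordProcessing := by
  intro text _
  unfold Spec_wordProcessing wordProcessing wordProcessing_alt
  simp only
  rw [pv_fold_filter pvPunct]
  have : ∀ (l : List Char),
      l.filter (fun ch => !pvPunct.contains ch)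
        = l.filter (fun ch => !(PySem.Set.contains (PySem.Set.ofList pvPunct) ch)) := by
    intro l
    apply List.filter_congr
    intro x _
    rw [pv_set_contains]
  rw [this]
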